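-- pv_equiv track=rewrite | github.com/MdAkashSheikh/All_Code | Compiler_Code/repetedValuesInArrayLAB1.py | Repetation
-- ===== SOURCE A (Python) =====
-- def Repetation(list):
--     repeted = dict()
--     for i in range(0, len(list)):
--         count = 0
--         for j in range(0, len(list)):
--             if list[i] == list[j]:
--                 count += 1
--         if count != 1:
--             repeted[list[i]] = count
--     return repeted
-- ===== SOURCE B (Python) =====
-- def Repetation(list):
--     counts = {}
--     for x in list:
--         counts[x] = counts.get(x, 0) + 1
--     return {k: v for k, v in counts.items() if v != 1}
-- ===== Notes on version B (the rewrite author's own statement) =====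
-- stated objective: faster
-- what changed: Replaces A's per-element full rescan (for every index, an inner loop recounts that value over the whole list) with a single frequency-dictionary pass followed by a filter over the table's items instead of the input.
import Mathlib
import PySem

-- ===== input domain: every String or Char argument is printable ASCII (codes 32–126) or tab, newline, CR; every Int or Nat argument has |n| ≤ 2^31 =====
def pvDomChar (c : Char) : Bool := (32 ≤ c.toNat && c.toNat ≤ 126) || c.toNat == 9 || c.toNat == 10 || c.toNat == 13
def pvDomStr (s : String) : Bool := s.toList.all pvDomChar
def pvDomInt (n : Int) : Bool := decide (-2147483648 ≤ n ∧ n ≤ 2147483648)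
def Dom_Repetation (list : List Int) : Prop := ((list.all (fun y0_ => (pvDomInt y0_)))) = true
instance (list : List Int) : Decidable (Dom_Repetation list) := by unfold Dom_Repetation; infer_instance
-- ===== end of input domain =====

-- B replaces A's quadratic per-element rescan by one counting pass plus a filter over the
-- frequency table (objective: faster; the dict holds each value's total count).


-- ===== PORT A =====
def Repetation (list : List Int) : List (Int × Int) :=
  ((PySem.List.pyRange 0 (PySem.List.len list)).foldl
    (fun (repeted : PySem.Dict Int Int) i =>
      let count : Int :=
        (PySem.List.pyRange 0 (PySem.List.len list)).foldl
          (fun count j =>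
            if PySem.List.pyGetD list i 0 = PySem.List.pyGetD list j 0 then count + 1 else count)
          0
      if count ≠ 1 then repeted.insert (PySem.List.pyGetD list i 0) count else repeted)
    PySem.Dict.empty).items

-- ===== PORT B =====
def Repetation_alt (list : List Int) : List (Int × Int) :=
  let counts : PySem.Dict Int Int :=
    list.foldl (fun d x => d.insert x (d.getD x 0 + 1)) PySem.Dict.empty
  (PySem.Dict.ofList (counts.items.filter (fun kv => kv.2 != 1))).items

-- ===== PRECONDITION & SPEC =====
def Spec_Repetation (list : List Int) (out : List (Int × Int)) : Prop := out = Repetation_alt list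
instance (list : List Int) (out : List (Int × Int)) : Decidable (Spec_Repetation list out) := by unfold Spec_Repetation; infer_instance

-- ===== CLAIM (what is proved, stated in full; the proofs are below) =====
def Claim_equal_Repetation : Prop := ∀ (list : List Int), Dom_Repetation list → Spec_Repetation list (Repetation list)

-- ===== LEMMAS AND PROOFS =====

-- the inner counting loop of A counts occurrences of v in l
theorem pv_inner_count (l : List Int) (v : Int) :
    ∀ (a : Int), l.foldl (fun c y => if v = y then c + 1 else c) a = a + (List.count v l : Int) := by
  induction l with
  | nil => intro a; simp
  | cons x xs ih =>
      intro a
      by_cases h : v = x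
      · subst h
        simp [List.foldl_cons, ih, List.count_cons_self]
        ring
      · simp [List.foldl_cons, h, ih, List.count_cons_of_ne (fun hc => h hc.symm)]

-- A's step function, with the inner loop replaced by its value
def pvStep (l : List Int) (d : PySem.Dict Int Int) (x : Int) : PySem.Dict Int Int :=
  if (List.count x l : Int) ≠ 1 then d.insert x (List.count x l : Int) else d

theorem pv_A_eq_fold (l : List Int) :
    Repetation l = (l.foldl (pvStep l) PySem.Dict.empty).items := by
  unfold Repetation
  rw [PySem.List.foldl_pyRange_zero_pyGetD l 0
      (fun (repeted : PySem.Dict Int Int) v =>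
        let count : Int :=
          (PySem.List.pyRange 0 (PySem.List.len l)).foldl
            (fun count j => if v = PySem.List.pyGetD l j 0 then count + 1 else count) 0
        if count ≠ 1 then repeted.insert v count else repeted)
      PySem.Dict.empty]
  congr 1
  apply PySem.List.foldl_congr_mem
  intro d x _
  show (let count : Int :=
          (PySem.List.pyRange 0 (PySem.List.len l)).foldl
            (fun count j => if x = PySem.List.pyGetD l j 0 then count + 1 else count) 0
        if count ≠ 1 then d.insert x count else d) = pvStep l d x
  rw [PySem.List.foldl_pyRange_zero_pyGetD l 0
      (fun (c : Int) y => if x = y then c + 1 else c) 0]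
  simp only [pv_inner_count l x 0, zero_add]
  rfl

theorem pv_nodup_keys_fold (l : List Int) :
    ∀ (m : List Int) (d : PySem.Dict Int Int), d.keys.Nodup → (m.foldl (pvStep l) d).keys.Nodup := by
  intro m
  induction m with
  | nil => intro d h; exact h
  | cons x xs ih =>
      intro d h
      simp only [List.foldl_cons]
      apply ih
      unfold pvStep
      split
      · exact PySem.Dict.nodup_keys_insert d x _ h
      · exact h

theorem pv_keys_fold (l : List Int) :
    ∀ (m : List Int) (d : PySem.Dict Int Int),
      (m.foldl (pvStep l) d).keys =
        PySem.Set.update d.keys (m.filter (fun x => decide ((List.count x l : Int) ≠ 1))) := by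
  intro m
  induction m with
  | nil => intro d; rfl
  | cons x xs ih =>
      intro d
      simp only [List.foldl_cons, List.filter_cons]
      by_cases h : (List.count x l : Int) ≠ 1
      · simp only [decide_eq_true h, if_true]
        rw [ih]
        have : (pvStep l d x).keys = PySem.Set.add d.keys x := by
          unfold pvStep PySem.Set.add
          rw [if_pos h]
          by_cases hc : d.contains x = true
          · rw [PySem.Dict.keys_insert_of_contains d _ hc]
            have hm : x ∈ d.keys := (PySem.Dict.contains_iff_mem_keys d x).mp hc
            simp [hm]
          · rw [PySem.Dict.keys_insert_of_not_contains d _ (by simpa using hc)]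
            have hm : x ∉ d.keys := fun hm => hc ((PySem.Dict.contains_iff_mem_keys d x).mpr hm)
            simp [hm]
        rw [this]
        rfl
      · have hd : pvStep l d x = d := by unfold pvStep; simp [h]
        simp [hd, ih, h]

theorem pv_getD_fold (l : List Int) :
    ∀ (m : List Int) (d : PySem.Dict Int Int) (k : Int),
      (m.foldl (pvStep l) d).getD k 0 =
        if k ∈ m ∧ (List.count k l : Int) ≠ 1 then (List.count k l : Int) else d.getD k 0 := by
  intro m
  induction m with
  | nil => intro d k; simp
  | cons x xs ih =>
      intro d k
      simp only [List.foldl_cons, ih]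
      by_cases hne : (List.count k l : Int) ≠ 1
      · by_cases hmem : k ∈ xs
        · simp [hmem, hne, List.mem_cons]
        · by_cases hkx : k = x
          · subst hkx
            have hstep : pvStep l d k = d.insert k (List.count k l : Int) := by
              unfold pvStep; simp [hne]
            simp [hmem, hne, hstep]
          · have hstep : (pvStep l d x).getD k 0 = d.getD k 0 := by
              unfold pvStep
              split
              · rw [PySem.Dict.getD_insert]; simp [hkx]
              · rfl
            simp [hmem, hne, hkx, hstep, List.mem_cons]
      · have hstep : (pvStep l d x).getD k 0 = d.getD k 0 := by
          unfold pvStep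
          by_cases h1 : (List.count x l : Int) ≠ 1
          · rw [if_pos h1, PySem.Dict.getD_insert]
            split
            · next heq => subst heq; exact absurd h1 hne
            · rfl
          · rw [if_neg h1]
        simp [hne, hstep]

-- filtering commutes with first-occurrence dedup (Set.ofList)
theorem pv_filter_foldl_add (p : Int → Bool) :
    ∀ (xs : List Int) (acc : PySem.Set Int),
      (xs.foldl PySem.Set.add acc).filter p = (xs.filter p).foldl PySem.Set.add (acc.filter p) := by
  intro xs
  induction xs with
  | nil => intro acc; rfl
  | cons x xs ih =>
      intro acc
      simp only [List.foldl_cons, List.filter_cons]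
      rw [ih]
      by_cases hp : p x = true
      · simp only [hp, if_true, List.foldl_cons]
        have : (PySem.Set.add acc x).filter p = PySem.Set.add (acc.filter p) x := by
          unfold PySem.Set.add
          by_cases hmem : x ∈ acc
          · have h2 : x ∈ acc.filter p := List.mem_filter.mpr ⟨hmem, hp⟩
            simp [hmem, h2]
          · have h2 : x ∉ acc.filter p := fun hmf => hmem (List.mem_filter.mp hmf).1
            simp [hmem, h2, List.filter_append, hp]
        rw [this]
      · have hp' : p x = false := by simpa using hp
        simp only [hp', Bool.false_eq_true, if_false]
        have : (PySem.Set.add acc x).filter p = acc.filter p := by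
          unfold PySem.Set.add
          by_cases hmem : x ∈ acc
          · simp [hmem]
          · simp [hmem, List.filter_append, hp']
        rw [this]

theorem pv_ofList_filter (p : Int → Bool) (l : List Int) :
    PySem.Set.ofList (l.filter p) = (PySem.Set.ofList l).filter p := by
  unfold PySem.Set.ofList
  rw [pv_filter_foldl_add p l PySem.Set.empty]
  rfl

-- B's result, in closed form
theorem pv_B_items (l : List Int) :
    Repetation_alt l =
      ((PySem.Set.ofList l).filter (fun k => decide ((List.count k l : Int) ≠ 1))).map
        (fun k => (k, (List.count k l : Int))) := by
  unfold Repetation_alt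
  simp only [PySem.Dict.foldl_insert_getD_add_one_eq_counter, PySem.Dict.items_counter]
  rw [List.filter_map]
  have hfun : ((fun kv : Int × Int => kv.2 != 1) ∘ (fun k => (k, (List.count k l : Int)))) =
      (fun k => decide ((List.count k l : Int) ≠ 1)) := by
    funext k
    rw [Bool.eq_iff_iff]
    simp [bne_iff_ne]
  rw [hfun]
  set ks := (PySem.Set.ofList l).filter (fun k => decide ((List.count k l : Int) ≠ 1)) with hks
  have hnd : ks.Nodup := (PySem.Set.nodup_ofList l).filter _
  have := PySem.Dict.items_foldl_insert_fresh
      (ks.map (fun k => (k, (List.count k l : Int)))) Prod.fst Prod.snd PySem.Dict.empty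
      (by intro a _; simp [PySem.Dict.contains_empty])
      (by
        rw [List.map_map]
        show (List.map (fun k => k) ks).Nodup
        simpa using hnd)
  show (PySem.Dict.ofList (ks.map (fun k => (k, (List.count k l : Int))))).items =
      ks.map (fun k => (k, (List.count k l : Int)))
  unfold PySem.Dict.ofList PySem.Dict.update
  simpa using this

-- A's result, in the same closed form
theorem pv_A_items (l : List Int) :
    Repetation l =
      ((PySem.Set.ofList l).filter (fun k => decide ((List.count k l : Int) ≠ 1))).map
        (fun k => (k, (List.count k l : Int))) := by
  rw [pv_A_eq_fold]
  have hnd : (l.foldl (pvStep l) PySem.Dict.empty).keys.Nodup :=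
    pv_nodup_keys_fold l l PySem.Dict.empty (by simp [PySem.Dict.keys_empty])
  rw [PySem.Dict.items_eq_map_keys _ hnd 0]
  have hkeys : (l.foldl (pvStep l) PySem.Dict.empty).keys =
      PySem.Set.ofList (l.filter (fun x => decide ((List.count x l : Int) ≠ 1))) := by
    rw [pv_keys_fold l l PySem.Dict.empty]
    rfl
  rw [hkeys, pv_ofList_filter]
  apply List.map_congr_left
  intro k hk
  have hk' := List.mem_filter.mp hk
  have hkl : k ∈ l := (PySem.Set.mem_ofList l k).mp hk'.1
  have hne : (List.count k l : Int) ≠ 1 := by simpa using hk'.2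
  rw [pv_getD_fold l l PySem.Dict.empty k]
  simp [hkl, hne]

-- ===== VERDICT (by name: the statement is the Claim_ definition above) =====
theorem Repetation_spec : Claim_equal_Repetation := by
  intro l _
  show Repetation l = Repetation_alt l
  rw [pv_A_items, pv_B_items]
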